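-- pv_equiv track=rewrite | github.com/emptyewer/deepncli | deepncli/junction/main.py | junctions_in_read
-- ===== SOURCE A (Python) =====
-- def junctions_in_read(read, junction_sequences):
--     match_index = -1
--     junction_index = -1
--     for i, j in enumerate(junction_sequences):
--         if j in read:
--             match_index = read.index(j)
--             junction_index = i
--     return junction_index, match_index
-- ===== SOURCE B (Python) =====
-- def junctions_in_read(read, junction_sequences):
--     # Scan the junctions from last to first and return on the first hit:
--     # the last junction contained in the read wins, with its first position.
--     for i in range(len(junction_sequences) - 1, -1, -1):
--         pos = read.find(junction_sequences[i])
--         if pos != -1: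
--             return i, pos
--     return -1, -1
-- ===== Notes on version B (the rewrite author's own statement) =====
-- stated objective: faster
-- what changed: B scans the junction list backwards and returns at the first junction contained in the read (the last match A would keep, with its first position), instead of A's full forward fold that searches every junction and keeps overwriting the result.
import Mathlib
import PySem

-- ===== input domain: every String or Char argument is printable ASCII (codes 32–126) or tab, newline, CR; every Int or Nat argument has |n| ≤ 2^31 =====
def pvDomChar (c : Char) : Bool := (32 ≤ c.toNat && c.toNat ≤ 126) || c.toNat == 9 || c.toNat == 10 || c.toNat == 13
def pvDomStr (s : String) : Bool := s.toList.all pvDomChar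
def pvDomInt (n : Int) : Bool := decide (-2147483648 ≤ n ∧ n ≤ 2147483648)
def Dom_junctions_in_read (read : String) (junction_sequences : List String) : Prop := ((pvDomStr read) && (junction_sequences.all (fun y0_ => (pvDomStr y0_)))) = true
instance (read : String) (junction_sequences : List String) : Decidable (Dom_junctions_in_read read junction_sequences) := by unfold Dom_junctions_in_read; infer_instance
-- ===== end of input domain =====

-- B replaces A's full forward fold (last match overwrites) by a backward scan
-- that returns at the first junction contained in the read (objective: alternative).

-- ===== PORT A =====
-- for i, j in enumerate(junction_sequences): if j in read: match_index = read.index(j); junction_index = i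
-- read.index(j) is only evaluated under 'j in read', where it equals PySem.Str.find read j (no exception).
def junctions_in_read (read : String) (junction_sequences : List String) : Int × Int :=
  (PySem.List.enumerate junction_sequences).foldl
    (fun st p =>
      if PySem.Str.isIn p.2 read then (p.1, PySem.Str.find read p.2) else st)
    (-1, -1)

-- ===== PORT B =====
-- Source B's descending index loop, transcribed as recursion over the reversed enumerated list.
def junctionsAltGo (read : String) : List (Int × String) → Int × Int
  | [] => (-1, -1)
  | p :: rest =>
    let pos := PySem.Str.find read p.2
    if pos ≠ -1 then (p.1, pos) else junctionsAltGo read rest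

def junctions_in_read_alt (read : String) (junction_sequences : List String) : Int × Int :=
  junctionsAltGo read (PySem.List.enumerate junction_sequences).reverse

-- ===== PRECONDITION & SPEC =====
def Spec_junctions_in_read (read : String) (junction_sequences : List String) (out : Int × Int) : Prop := out = junctions_in_read_alt read junction_sequences
instance (read : String) (junction_sequences : List String) (out : Int × Int) : Decidable (Spec_junctions_in_read read junction_sequences out) := by unfold Spec_junctions_in_read; infer_instance

-- ===== CLAIM (what is proved, stated in full; the proofs are below) =====
def Claim_equal_junctions_in_read : Prop := ∀ (read : String) (junction_sequences : List String), Dom_junctions_in_read read junction_sequences → Spec_junctions_in_read read junction_sequences (junctions_in_read read junction_sequences)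

-- ===== LEMMAS AND PROOFS =====

lemma foldl_eq_altGo_reverse (read : String) (m : List (Int × String)) :
    m.foldl
      (fun st p =>
        if PySem.Str.isIn p.2 read then (p.1, PySem.Str.find read p.2) else st)
      (-1, -1)
    = junctionsAltGo read m.reverse := by
  induction m using List.reverseRecOn with
  | nil => rfl
  | append_singleton l x ih =>
    rw [List.foldl_append, List.reverse_append]
    simp only [List.foldl_cons, List.foldl_nil, List.reverse_singleton, List.singleton_append,
      junctionsAltGo]
    by_cases hc : PySem.Chars.find read.toList x.2.toList = -1
    · have hin : PySem.Chars.isIn x.2.toList read.toList = false :=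
        (PySem.Chars.isIn_eq_false_iff _ _).mpr ((PySem.Chars.find_eq_neg_one_iff _ _).mp hc)
      simp only [PySem.Str.isIn_eq, PySem.Str.find_eq] at ih
      simp [hin, hc, ih]
    · have hinf := (PySem.Chars.find_ne_neg_one_iff _ _).mp hc
      have hin : PySem.Chars.isIn x.2.toList read.toList = true := by
        by_contra hx
        exact absurd hinf ((PySem.Chars.isIn_eq_false_iff _ _).mp (Bool.eq_false_iff.mpr hx))
      simp [hin, hc]

-- ===== VERDICT (by name: the statement is the Claim_ definition above) =====
theorem junctions_in_read_spec : Claim_equal_junctions_in_read := by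
  intro read js _
  unfold Spec_junctions_in_read junctions_in_read junctions_in_read_alt
  exact foldl_eq_altGo_reverse read (PySem.List.enumerate js)
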